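-- pv_equiv track=rewrite | github.com/yoonui/2025-4q-coding-test | 12월/251229_2_ 옹알이_(2).py | solution
-- ===== SOURCE A (Python) =====
-- def solution(babbling):
--     answer = 0
--
--     for i in babbling:
--         tmp = i
--         len2 = i[0:2]
--         stack = [0]
--
--         while tmp:
--             len2 = tmp[0:2]
--             len3 = tmp[0:3]
--
--             if len2 in ["ye", "ma"]:
--                 if stack.pop() == len2: break
--                 stack.append(len2)
--                 tmp = tmp[2:]
--             elif len3 in ["aya", "woo"]:
--                 if stack.pop() == len3: break
--                 stack.append(len3)
--                 tmp = tmp[3:]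
--             else: break
--
--         if len(tmp) == 0:
--             answer += 1
--
--     return answer
-- ===== SOURCE B (Python) =====
-- def solution(babbling):
--     sylls = ("aya", "ye", "woo", "ma")
--     answer = 0
--     for word in babbling:
--         i = 0
--         prev = ""
--         n = len(word)
--         while i < n:
--             for s in sylls:
--                 if s != prev and word.startswith(s, i):
--                     prev = s
--                     i += len(s)
--                     break
--             else:
--                 break
--         if i >= n:
--             answer += 1
--     return answer
-- ===== Notes on version B (the rewrite author's own statement) =====
-- stated objective: alternative
-- what changed: A repeatedly slices the remaining string (tmp[0:2], tmp[0:3], tmp[2:], tmp[3:]) and keeps a pop/push stack holding the previous syllable; B scans each word once with an index pointer and startswith, matching syllables in place with no slicing and a plain prev variable.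
import Mathlib
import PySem

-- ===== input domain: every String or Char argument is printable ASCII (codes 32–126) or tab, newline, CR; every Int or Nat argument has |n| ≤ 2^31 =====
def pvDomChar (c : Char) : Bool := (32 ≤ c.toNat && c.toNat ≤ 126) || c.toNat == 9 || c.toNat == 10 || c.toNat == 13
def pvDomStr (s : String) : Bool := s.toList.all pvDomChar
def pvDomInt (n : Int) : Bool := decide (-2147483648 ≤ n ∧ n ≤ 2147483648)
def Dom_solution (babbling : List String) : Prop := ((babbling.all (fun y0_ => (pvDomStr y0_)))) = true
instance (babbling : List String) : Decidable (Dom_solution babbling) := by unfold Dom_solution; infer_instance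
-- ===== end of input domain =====

-- B replaces A's repeated string slicing and pop/push stack with a single index-pointer scan matching syllables in place (alternative structure, same measured cost).


-- ===== PORT A =====
-- Python's stack holds the int 0 (ported as `none`) or a syllable string (ported as `some <chars>`);
-- `0 == "ye"` is False in Python, matching `none ≠ some _`.
-- The while loop: each iteration consumes 2 or 3 chars of tmp or breaks; it returns the final tmp.
def loopA (tmp : List Char) (stack : List (Option (List Char))) : List Char :=
  match tmp with
  | [] => []
  | c :: rest =>
    let len2 := (c :: rest).take 2
    let len3 := (c :: rest).take 3
    if len2 = ['y','e'] ∨ len2 = ['m','a'] then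
      match PySem.List.pop? stack (-1) with
      | none => c :: rest   -- unreachable: the stack always has exactly one element (Python would raise)
      | some (popped, st') =>
        if popped = some len2 then c :: rest
        else loopA ((c :: rest).drop 2) (st' ++ [some len2])
    else if len3 = ['a','y','a'] ∨ len3 = ['w','o','o'] then
      match PySem.List.pop? stack (-1) with
      | none => c :: rest
      | some (popped, st') =>
        if popped = some len3 then c :: rest
        else loopA ((c :: rest).drop 3) (st' ++ [some len3])
    else c :: rest
termination_by tmp.length
decreasing_by all_goals simp [List.length_drop]

def solution (babbling : List String) : Int :=
  babbling.foldl (fun answer i =>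
    let tmp := loopA i.toList [none]
    if tmp.length = 0 then answer + 1 else answer) 0

-- ===== PORT B =====
def syllsB : List (List Char) := [['a','y','a'], ['y','e'], ['w','o','o'], ['m','a']]

-- the inner `for s in sylls: … else: …` of Source B: first syllable that differs from prev and is a prefix
def findSyll (w prev : List Char) : List (List Char) → Option (List Char)
  | [] => none
  | s :: rest => if s ≠ prev ∧ s.isPrefixOf w then s else findSyll w prev rest

theorem findSyll_mem {w prev s : List Char} : ∀ {l : List (List Char)},
    findSyll w prev l = some s → s ∈ l := by
  intro l; induction l with
  | nil => simp [findSyll]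
  | cons a t ih =>
    simp only [findSyll]
    split
    · intro h; simp at h; simp [h]
    · intro h; simp [ih h]

-- Source B's while loop over the index pointer, ported as recursion on the remaining suffix of the word
def loopB (w prev : List Char) : Bool :=
  match hw : w with
  | [] => true
  | _ :: _ =>
    match hf : findSyll w prev syllsB with
    | none => false
    | some s => loopB (w.drop s.length) s
termination_by w.length
decreasing_by
  have hm := findSyll_mem hf
  have : 2 ≤ s.length := by
    simp [syllsB] at hm
    rcases hm with h | h | h | h <;> simp [h]
  subst hw; simp_all [List.length_drop]; omega

def solution_alt (babbling : List String) : Int :=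
  babbling.foldl (fun answer word =>
    if loopB word.toList [] then answer + 1 else answer) 0

-- ===== PRECONDITION & SPEC =====
def Spec_solution (babbling : List String) (out : Int) : Prop := out = solution_alt babbling
instance (babbling : List String) (out : Int) : Decidable (Spec_solution babbling out) := by unfold Spec_solution; infer_instance

-- ===== CLAIM (what is proved, stated in full; the proofs are below) =====
def Claim_equal_solution : Prop := ∀ (babbling : List String), Dom_solution babbling → Spec_solution babbling (solution babbling)

-- ===== LEMMAS AND PROOFS =====

theorem loopB_cons (c : Char) (r : List Char) (prev : List Char) :
  loopB (c::r) prev = (match findSyll (c::r) prev syllsB with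
    | none => false | some s => loopB ((c::r).drop s.length) s) := by
  rw [loopB]; split <;> rename_i h <;> rw [h]

-- key lemma: per word, A's loop consumes everything iff B's loop accepts, for matching "previous syllable" state
theorem loop_agree : ∀ (n : ℕ) (tmp : List Char), tmp.length ≤ n → ∀ (p : Option (List Char)),
    (loopA tmp [p] = [] ↔ loopB tmp (p.getD []) = true) := by
  intro n
  induction n with
  | zero =>
    intro tmp h p
    have htmp : tmp = [] := by cases tmp <;> simp_all
    subst htmp; simp [loopA, loopB]
  | succ n ih =>
    intro tmp h p
    match tmp with
    | [] => simp [loopA, loopB]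
    | [c1] =>
      have hf : findSyll [c1] (p.getD []) syllsB = none := by
        simp [findSyll, syllsB, List.isPrefixOf]
      rw [loopA, loopB_cons, hf]; simp
    | [c1, c2] =>
      by_cases hye : c1 = 'y' ∧ c2 = 'e'
      · obtain ⟨rfl, rfl⟩ := hye
        by_cases hp : p = some ['y','e']
        · subst hp; rw [loopA, loopB_cons]
          simp [findSyll, syllsB, List.isPrefixOf, PySem.List.pop?, PySem.List.pyIdx?]
        · have hprev : p.getD [] ≠ ['y','e'] := by cases p <;> simp_all
          rw [loopA, loopB_cons]
          simp [findSyll, syllsB, List.isPrefixOf, PySem.List.pop?, PySem.List.pyIdx?, Ne.symm hprev, hp]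
          exact ih [] (by simp) (some ['y','e'])
      · by_cases hma : c1 = 'm' ∧ c2 = 'a'
        · obtain ⟨rfl, rfl⟩ := hma
          by_cases hp : p = some ['m','a']
          · subst hp; rw [loopA, loopB_cons]
            simp [findSyll, syllsB, List.isPrefixOf, PySem.List.pop?, PySem.List.pyIdx?]
          · have hprev : p.getD [] ≠ ['m','a'] := by cases p <;> simp_all
            rw [loopA, loopB_cons]
            simp [findSyll, syllsB, List.isPrefixOf, PySem.List.pop?, PySem.List.pyIdx?, Ne.symm hprev, hp]
            exact ih [] (by simp) (some ['m','a'])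
        · have g1 : (c1 = 'y' ∧ c2 = 'e') = False := eq_false hye
          have g1' : ('y' = c1 ∧ 'e' = c2) = False := eq_false (fun h => hye ⟨h.1.symm, h.2.symm⟩)
          have g2 : (c1 = 'm' ∧ c2 = 'a') = False := eq_false hma
          have g2' : ('m' = c1 ∧ 'a' = c2) = False := eq_false (fun h => hma ⟨h.1.symm, h.2.symm⟩)
          rw [loopA, loopB_cons]
          simp [findSyll, syllsB, List.isPrefixOf, g1, g1', g2, g2']
    | c1 :: c2 :: c3 :: r =>
      have hr : (c3 :: r).length ≤ n := by simp at h ⊢; omega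
      have hr' : r.length ≤ n := by simp at h; omega
      by_cases hye : c1 = 'y' ∧ c2 = 'e'
      · obtain ⟨rfl, rfl⟩ := hye
        by_cases hp : p = some ['y','e']
        · subst hp; rw [loopA, loopB_cons]
          simp [findSyll, syllsB, List.isPrefixOf, PySem.List.pop?, PySem.List.pyIdx?]
        · have hprev : p.getD [] ≠ ['y','e'] := by cases p <;> simp_all
          rw [loopA, loopB_cons]
          simp [findSyll, syllsB, List.isPrefixOf, PySem.List.pop?, PySem.List.pyIdx?, Ne.symm hprev, hp]
          exact ih (c3 :: r) hr (some ['y','e'])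
      · by_cases hma : c1 = 'm' ∧ c2 = 'a'
        · obtain ⟨rfl, rfl⟩ := hma
          by_cases hp : p = some ['m','a']
          · subst hp; rw [loopA, loopB_cons]
            simp [findSyll, syllsB, List.isPrefixOf, PySem.List.pop?, PySem.List.pyIdx?]
          · have hprev : p.getD [] ≠ ['m','a'] := by cases p <;> simp_all
            rw [loopA, loopB_cons]
            simp [findSyll, syllsB, List.isPrefixOf, PySem.List.pop?, PySem.List.pyIdx?, Ne.symm hprev, hp]
            exact ih (c3 :: r) hr (some ['m','a'])
        · by_cases haya : c1 = 'a' ∧ c2 = 'y' ∧ c3 = 'a'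
          · obtain ⟨rfl, rfl, rfl⟩ := haya
            by_cases hp : p = some ['a','y','a']
            · subst hp; rw [loopA, loopB_cons]
              simp [findSyll, syllsB, List.isPrefixOf, PySem.List.pop?, PySem.List.pyIdx?]
            · have hprev : p.getD [] ≠ ['a','y','a'] := by cases p <;> simp_all
              rw [loopA, loopB_cons]
              simp [findSyll, syllsB, List.isPrefixOf, PySem.List.pop?, PySem.List.pyIdx?, Ne.symm hprev, hp]
              exact ih r hr' (some ['a','y','a'])
          · by_cases hwoo : c1 = 'w' ∧ c2 = 'o' ∧ c3 = 'o'
            · obtain ⟨rfl, rfl, rfl⟩ := hwoo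
              by_cases hp : p = some ['w','o','o']
              · subst hp; rw [loopA, loopB_cons]
                simp [findSyll, syllsB, List.isPrefixOf, PySem.List.pop?, PySem.List.pyIdx?]
              · have hprev : p.getD [] ≠ ['w','o','o'] := by cases p <;> simp_all
                rw [loopA, loopB_cons]
                simp [findSyll, syllsB, List.isPrefixOf, PySem.List.pop?, PySem.List.pyIdx?, Ne.symm hprev, hp]
                exact ih r hr' (some ['w','o','o'])
            · have g1 : (c1 = 'y' ∧ c2 = 'e') = False := eq_false hye
              have g1' : ('y' = c1 ∧ 'e' = c2) = False := eq_false (fun h => hye ⟨h.1.symm, h.2.symm⟩)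
              have g2 : (c1 = 'm' ∧ c2 = 'a') = False := eq_false hma
              have g2' : ('m' = c1 ∧ 'a' = c2) = False := eq_false (fun h => hma ⟨h.1.symm, h.2.symm⟩)
              have g3 : (c1 = 'a' ∧ c2 = 'y' ∧ c3 = 'a') = False := eq_false haya
              have g3' : ('a' = c1 ∧ 'y' = c2 ∧ 'a' = c3) = False :=
                eq_false (fun h => haya ⟨h.1.symm, h.2.1.symm, h.2.2.symm⟩)
              have g4 : (c1 = 'w' ∧ c2 = 'o' ∧ c3 = 'o') = False := eq_false hwoo
              have g4' : ('w' = c1 ∧ 'o' = c2 ∧ 'o' = c3) = False :=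
                eq_false (fun h => hwoo ⟨h.1.symm, h.2.1.symm, h.2.2.symm⟩)
              rw [loopA, loopB_cons]
              simp [findSyll, syllsB, List.isPrefixOf, g1, g1', g2, g2', g3, g3', g4, g4']

theorem solution_spec' : ∀ (babbling : List String), solution babbling = solution_alt babbling := by
  intro babbling
  have key : ∀ (w : String), ((loopA w.toList [none]).length = 0) ↔ (loopB w.toList [] = true) := by
    intro w
    rw [List.length_eq_zero_iff]
    exact loop_agree w.toList.length w.toList le_rfl none
  have hfun : (fun (answer : Int) (i : String) =>
      let tmp := loopA i.toList [none]
      if tmp.length = 0 then answer + 1 else answer)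
      = (fun (answer : Int) (word : String) => if loopB word.toList [] then answer + 1 else answer) := by
    funext a w
    by_cases hb : loopB w.toList [] = true
    · simp [hb, (key w).mpr hb]
    · have hl : ¬ (loopA w.toList [none]).length = 0 := fun hh => hb ((key w).mp hh)
      simp [hb, hl]
  unfold solution solution_alt
  rw [hfun]

-- ===== VERDICT (by name: the statement is the Claim_ definition above) =====
theorem solution_spec : Claim_equal_solution := by
  intro b _; exact solution_spec' b
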